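-- pv_equiv track=rewrite | github.com/kjh03160/Algorithm_Basic | practice/DFS_BFS/Section_2583.py | answer
-- ===== SOURCE A (Python) =====
-- def answer(R):
--     DIRECTION = ((1, 0), (0, 1), (-1, 0), (0, -1))
--
--     def dfs(row, col, R, DIRECTION, s):
--         for r, c in DIRECTION:
--             drow = r + row
--             dcol = c + col
--
--             if drow < 0 or dcol < 0 or drow >= len(R) - 1 or dcol >= len(R[0]) - 1:
--                 continue
--
--             if R[drow][dcol] == 0:
--                 R[drow][dcol] = 1
--                 s += 1
--                 s = dfs(drow, dcol, R, DIRECTION, s)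
--         return s
--
--     count = 0
--     result = []
--     for row in range(len(R) - 1):
--         for col in range(len(R[0]) - 1):
--             if R[row][col] == 0:
--                 R[row][col] = 1
--                 s = dfs(row, col, R, DIRECTION, 1)
--                 count += 1
--                 result.append(s)
--     return (count, sorted((result)))
-- ===== SOURCE B (Python) =====
-- def answer(R):
--     count = 0
--     result = []
--     for row in range(len(R) - 1):
--         for col in range(len(R[0]) - 1):
--             if R[row][col] == 0:
--                 R[row][col] = 1
--                 size = 1
--                 stack = [(row, col - 1), (row - 1, col), (row, col + 1), (row + 1, col)]
--                 while stack:
--                     r, c = stack.pop()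
--                     if r < 0 or c < 0 or r >= len(R) - 1 or c >= len(R[0]) - 1:
--                         continue
--                     if R[r][c] == 0:
--                         R[r][c] = 1
--                         size += 1
--                         stack.extend([(r, c - 1), (r - 1, c), (r, c + 1), (r + 1, c)])
--                 count += 1
--                 result.append(size)
--     return (count, sorted(result))
-- ===== Notes on version B (the rewrite author's own statement) =====
-- stated objective: alternative
-- what changed: The recursive DFS flood fill is replaced by an iterative explicit-stack flood fill (check-on-pop worklist), removing Python function-call recursion entirely while keeping the same scan order, boundary test and seed count.
import Mathlib
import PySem

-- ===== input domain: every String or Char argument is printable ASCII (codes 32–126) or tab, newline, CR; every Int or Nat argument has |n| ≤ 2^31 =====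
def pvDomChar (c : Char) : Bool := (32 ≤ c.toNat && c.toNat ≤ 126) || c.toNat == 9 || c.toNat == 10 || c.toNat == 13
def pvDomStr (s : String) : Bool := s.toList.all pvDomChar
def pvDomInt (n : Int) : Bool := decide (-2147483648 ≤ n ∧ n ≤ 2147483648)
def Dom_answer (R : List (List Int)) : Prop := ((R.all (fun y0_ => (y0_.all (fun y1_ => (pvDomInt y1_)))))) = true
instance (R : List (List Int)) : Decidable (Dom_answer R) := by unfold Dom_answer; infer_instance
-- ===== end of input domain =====

-- B replaces A's recursive DFS flood fill by an iterative explicit-stack flood fill (same scan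
-- order, boundary test and seed count); both mutate R identically in Python, the equivalence
-- proved here is about the return value.

-- ===== PORT A =====
-- the tuple DIRECTION
def DIRECTION : List (Int × Int) := [(1, 0), (0, 1), (-1, 0), (0, -1)]

-- R[i][j]; indices are nonnegative at every call site (guarded), and in range under Pre_,
-- where this is exact; the default 1 is only reachable outside Pre_ (Python raises there).
def gridGet (R : List (List Int)) (i j : Int) : Int :=
  (PySem.List.pyGet? ((PySem.List.pyGet? R i).getD []) j).getD 1

-- R[i][j] = 1; indices nonnegative at every call site, in range under Pre_ (exact there).
def gridSet (R : List (List Int)) (i j : Int) : List (List Int) :=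
  R.set i.toNat ((R.getD i.toNat []).set j.toNat 1)

-- number of 0-cells; used only to seed the fuel that makes the recursion total
def zeros (R : List (List Int)) : Nat :=
  (R.map (fun row => row.countP (fun x => x == 0))).sum

-- the nested function dfs: the for-loop over DIRECTION is the recursion on the dirs list,
-- the self-call recurses with fresh DIRECTION; fuel only makes it total (never exhausted
-- when seeded with 5 * zeros + 5, as proved below)
def dfsA : Nat → List (List Int) → Int → Int → Int → List (Int × Int) → List (List Int) × Int
  | 0, R, _, _, s, _ => (R, s)
  | Nat.succ _, R, _, _, s, [] => (R, s)
  | Nat.succ f, R, row, col, s, (r, c) :: rest =>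
    if r + row < 0 ∨ c + col < 0 ∨ (R.length : Int) - 1 ≤ r + row ∨
        ((R.headD []).length : Int) - 1 ≤ c + col then
      dfsA f R row col s rest
    else if gridGet R (r + row) (c + col) = 0 then
      let p := dfsA f (gridSet R (r + row) (c + col)) (r + row) (c + col) (s + 1) DIRECTION
      dfsA f p.1 row col p.2 rest
    else dfsA f R row col s rest

def answer (R : List (List Int)) : Int × List Int :=
  let fin := (PySem.List.pyRange 0 ((R.length : Int) - 1) 1).foldl (fun st row =>
    (PySem.List.pyRange 0 (((st.1.headD []).length : Int) - 1) 1).foldl (fun st2 col =>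
      if gridGet st2.1 row col = 0 then
        let R1 := gridSet st2.1 row col
        let p := dfsA (5 * zeros R1 + 5) R1 row col 1 DIRECTION
        (p.1, st2.2.1 + 1, st2.2.2 ++ [p.2])
      else st2) st) (R, (0 : Int), ([] : List Int))
  (fin.2.1, PySem.List.sorted fin.2.2 (fun x => x) false)

-- ===== PORT B =====
-- the list extended onto the stack, reversed because Python pops from the end
def nbrsB (r c : Int) : List (Int × Int) := [(r + 1, c), (r, c + 1), (r - 1, c), (r, c - 1)]

-- R[r][c]; indices nonnegative at every call site, in range under Pre_ (exact there)
def cellB (G : List (List Int)) (r c : Int) : Int := (G.getD r.toNat []).getD c.toNat 1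

-- R[r][c] = 1; indices nonnegative at every call site, in range under Pre_ (exact there)
def putB (G : List (List Int)) (r c : Int) : List (List Int) :=
  G.set r.toNat ((G.getD r.toNat []).set c.toNat 1)

-- the while-loop over the stack (head of the list = top of Python's stack);
-- fuel only makes it total (never exhausted when seeded as below, proved below)
def floodB : Nat → List (List Int) → List (Int × Int) → Int → List (List Int) × Int
  | 0, G, _, size => (G, size)
  | Nat.succ _, G, [], size => (G, size)
  | Nat.succ f, G, (r, c) :: rest, size =>
    if r < 0 ∨ c < 0 ∨ (G.length : Int) - 1 ≤ r ∨ ((G.headD []).length : Int) - 1 ≤ c then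
      floodB f G rest size
    else if cellB G r c = 0 then
      floodB f (putB G r c) (nbrsB r c ++ rest) (size + 1)
    else floodB f G rest size

-- the inner for-loop over col
def goColB : List (List Int) → Int → List Int → Int → List Int → List (List Int) × Int × List Int
  | G, count, result, _, [] => (G, count, result)
  | G, count, result, row, col :: cols =>
    if cellB G row col = 0 then
      let G1 := putB G row col
      let p := floodB (5 * G1.flatten.countP (fun x => x == 0) + 5) G1 (nbrsB row col) 1
      goColB p.1 (count + 1) (result ++ [p.2]) row cols
    else goColB G count result row cols

-- the outer for-loop over row
def goRowB : List (List Int) → Int → List Int → List Int → List (List Int) × Int × List Int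
  | G, count, result, [] => (G, count, result)
  | G, count, result, row :: rows =>
    let st := goColB G count result row
      (PySem.List.pyRange 0 (((G.headD []).length : Int) - 1) 1)
    goRowB st.1 st.2.1 st.2.2 rows

def answer_alt (R : List (List Int)) : Int × List Int :=
  let st := goRowB R 0 [] (PySem.List.pyRange 0 ((R.length : Int) - 1) 1)
  (st.2.1, PySem.List.sorted st.2.2 (fun x => x) false)

-- ===== PRECONDITION & SPEC =====
-- Pre_ excludes exactly the ragged grids on which Python A raises IndexError: every row that the
-- scan touches (all but the last) must have at least len(R[0]) - 1 entries.
def Pre_answer (R : List (List Int)) : Prop :=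
  ∀ row ∈ R.take (R.length - 1), (R.headD []).length - 1 ≤ row.length

instance (R : List (List Int)) : Decidable (Pre_answer R) := by unfold Pre_answer; infer_instance

def pvWitness_answer : List (List Int) := [[0, 1], [1, 0], [1, 1]]

def Spec_answer (R : List (List Int)) (out : Int × List Int) : Prop := out = answer_alt R
instance (R : List (List Int)) (out : Int × List Int) : Decidable (Spec_answer R out) := by unfold Spec_answer; infer_instance

-- ===== CLAIM (what is proved, stated in full; the proofs are below) =====
def Claim_equal_answer : Prop := ∀ (R : List (List Int)), Dom_answer R → Pre_answer R → Spec_answer R (answer R)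

-- ===== LEMMAS AND PROOFS =====

-- setting a 0-entry to 1 strictly decreases the number of zeros in a row
theorem pv_countP_set_lt : ∀ (row : List Int) (m : Nat) (h : m < row.length),
    row[m] = 0 → (row.set m 1).countP (fun x => x == 0) < row.countP (fun x => x == 0) := by
  intro row
  induction row with
  | nil => intro m h; simp at h
  | cons a l ih =>
    intro m h h0
    cases m with
    | zero =>
      simp only [List.getElem_cons_zero] at h0
      subst h0
      simp
    | succ m =>
      simp only [List.getElem_cons_succ] at h0
      simp only [List.set_cons_succ, List.countP_cons]
      have := ih m (by simpa using h) h0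
      omega

theorem pv_zeros_set_lt : ∀ (G : List (List Int)) (n : Nat) (row' : List Int)
    (hn : n < G.length), row'.countP (fun x => x == 0) < (G[n]).countP (fun x => x == 0) →
    zeros (G.set n row') < zeros G := by
  intro G
  induction G with
  | nil => intro n _ hn; simp at hn
  | cons g tl ih =>
    intro n row' hn hlt
    cases n with
    | zero =>
      simp only [List.getElem_cons_zero] at hlt
      simp only [List.set_cons_zero, zeros, List.map_cons, List.sum_cons]
      omega
    | succ n =>
      simp only [List.getElem_cons_succ] at hlt
      simp only [List.set_cons_succ, zeros, List.map_cons, List.sum_cons]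
      have := ih n row' (by simpa using hn) hlt
      simp only [zeros] at this
      omega

-- a cell that reads 0 is genuinely in range (the out-of-range default is 1)
theorem pv_gridGet_zero_range {G : List (List Int)} {r c : Int} (hr : 0 ≤ r) (hc : 0 ≤ c)
    (h : gridGet G r c = 0) :
    r.toNat < G.length ∧ c.toNat < (G.getD r.toNat []).length ∧
      (G.getD r.toNat [])[c.toNat]? = some 0 := by
  unfold gridGet at h
  rw [PySem.List.pyGet?_of_nonneg _ hr, PySem.List.pyGet?_of_nonneg _ hc] at h
  rw [List.getD_eq_getElem?_getD]
  cases hG : G[r.toNat]? with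
  | none => rw [hG] at h; simp at h
  | some row =>
    rw [hG] at h
    simp only [Option.getD_some] at h
    cases hRow : row[c.toNat]? with
    | none => rw [hRow] at h; simp at h
    | some v =>
      rw [hRow] at h
      simp only [Option.getD_some] at h
      subst h
      simp only [Option.getD_some]
      exact ⟨(List.getElem?_eq_some_iff.mp hG).1, (List.getElem?_eq_some_iff.mp hRow).1, hRow⟩

theorem pv_zeros_gridSet_lt {G : List (List Int)} {r c : Int} (hr : 0 ≤ r) (hc : 0 ≤ c)
    (h : gridGet G r c = 0) : zeros (gridSet G r c) < zeros G := by
  obtain ⟨h1, h2, h3⟩ := pv_gridGet_zero_range hr hc h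
  have hD : G.getD r.toNat [] = G[r.toNat] := by
    rw [List.getD_eq_getElem?_getD, List.getElem?_eq_getElem h1]; rfl
  unfold gridSet
  refine pv_zeros_set_lt G r.toNat _ h1 ?_
  rw [hD]
  refine pv_countP_set_lt _ c.toNat (by rw [hD] at h2; exact h2) ?_
  have := h3
  rw [hD] at this
  exact (List.getElem?_eq_some_iff.mp this).2

-- the ideal (unfueled) worklist flood fill both ports compute
def Tw : List (List Int) → List (Int × Int) → Int → List (List Int) × Int
  | G, [], s => (G, s)
  | G, (r, c) :: rest, s =>
    if r < 0 ∨ c < 0 ∨ (G.length : Int) - 1 ≤ r ∨ ((G.headD []).length : Int) - 1 ≤ c then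
      Tw G rest s
    else if h : gridGet G r c = 0 then
      Tw (gridSet G r c) (DIRECTION.map (fun d => (d.1 + r, d.2 + c)) ++ rest) (s + 1)
    else Tw G rest s
  termination_by G st _ => 5 * zeros G + st.length
  decreasing_by
  all_goals simp only [DIRECTION, List.length_append, List.length_map, List.length_cons,
    List.length_nil]
  all_goals first
  | omega
  | (have := pv_zeros_gridSet_lt (G := G) (r := r) (c := c) (by omega) (by omega) h; omega)

theorem Tw_nil (G : List (List Int)) (s : Int) : Tw G [] s = (G, s) := by simp [Tw]

theorem Tw_cons_guard {G : List (List Int)} {r c : Int} {rest : List (Int × Int)} {s : Int}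
    (hg : r < 0 ∨ c < 0 ∨ (G.length : Int) - 1 ≤ r ∨ ((G.headD []).length : Int) - 1 ≤ c) :
    Tw G ((r, c) :: rest) s = Tw G rest s := by
  rw [Tw.eq_def]; dsimp only; rw [if_pos hg]

theorem Tw_cons_flip {G : List (List Int)} {r c : Int} {rest : List (Int × Int)} {s : Int}
    (hg : ¬(r < 0 ∨ c < 0 ∨ (G.length : Int) - 1 ≤ r ∨ ((G.headD []).length : Int) - 1 ≤ c))
    (h0 : gridGet G r c = 0) :
    Tw G ((r, c) :: rest) s
      = Tw (gridSet G r c) (DIRECTION.map (fun d => (d.1 + r, d.2 + c)) ++ rest) (s + 1) := by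
  rw [Tw.eq_def]; dsimp only; rw [if_neg hg]; rw [dif_pos h0]

theorem Tw_cons_skip {G : List (List Int)} {r c : Int} {rest : List (Int × Int)} {s : Int}
    (hg : ¬(r < 0 ∨ c < 0 ∨ (G.length : Int) - 1 ≤ r ∨ ((G.headD []).length : Int) - 1 ≤ c))
    (h0 : ¬ gridGet G r c = 0) :
    Tw G ((r, c) :: rest) s = Tw G rest s := by
  rw [Tw.eq_def]; dsimp only; rw [if_neg hg]; rw [dif_neg h0]

theorem pv_zeros_Tw_le : ∀ (G : List (List Int)) (st : List (Int × Int)) (s : Int),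
    zeros (Tw G st s).1 ≤ zeros G := by
  intro G st s
  induction G, st, s using Tw.induct with
  | case1 G s => simp [Tw_nil]
  | case2 G r c rest s hg ih => rw [Tw_cons_guard hg]; exact ih
  | case3 G r c rest s hg h0 ih =>
    rw [Tw_cons_flip hg h0]
    have := pv_zeros_gridSet_lt (by omega) (by omega) h0
    omega
  | case4 G r c rest s hg h0 ih => rw [Tw_cons_skip hg h0]; exact ih

-- the worklist flood fill is compositional over the worklist
theorem pv_Tw_append : ∀ (G : List (List Int)) (L1 : List (Int × Int)) (s : Int)
    (L2 : List (Int × Int)),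
    Tw G (L1 ++ L2) s = Tw (Tw G L1 s).1 L2 (Tw G L1 s).2 := by
  intro G L1 s
  induction G, L1, s using Tw.induct with
  | case1 G s => intro L2; simp [Tw_nil]
  | case2 G r c rest s hg ih =>
    intro L2
    rw [List.cons_append, Tw_cons_guard hg, Tw_cons_guard hg]
    exact ih L2
  | case3 G r c rest s hg h0 ih =>
    intro L2
    rw [List.cons_append, Tw_cons_flip hg h0, Tw_cons_flip hg h0, ← List.append_assoc]
    exact ih L2
  | case4 G r c rest s hg h0 ih =>
    intro L2
    rw [List.cons_append, Tw_cons_skip hg h0, Tw_cons_skip hg h0]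
    exact ih L2

theorem pv_nbrsB_eq (r c : Int) : nbrsB r c = DIRECTION.map (fun d => (d.1 + r, d.2 + c)) := by
  simp only [nbrsB, DIRECTION, List.map_cons, List.map_nil, List.cons.injEq, Prod.mk.injEq,
    and_true]
  omega

theorem pv_cellB_eq (G : List (List Int)) {r c : Int} (hr : 0 ≤ r) (hc : 0 ≤ c) :
    cellB G r c = gridGet G r c := by
  unfold cellB gridGet
  rw [PySem.List.pyGet?_of_nonneg _ hr, PySem.List.pyGet?_of_nonneg _ hc,
    List.getD_eq_getElem?_getD, List.getD_eq_getElem?_getD]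

theorem pv_putB_eq (G : List (List Int)) (r c : Int) : putB G r c = gridSet G r c := rfl

theorem pv_zeros_eq_flatten (G : List (List Int)) :
    G.flatten.countP (fun x => x == 0) = zeros G := by
  induction G with
  | nil => simp [zeros]
  | cons g tl ih =>
    simp only [List.flatten_cons, List.countP_append, zeros, List.map_cons, List.sum_cons]
    simp only [zeros] at ih
    omega

theorem pv_DIRECTION_length : DIRECTION.length = 4 := by simp [DIRECTION]

-- the fueled recursive DFS of port A computes the ideal worklist flood fill
theorem pv_dfsA_eq_Tw : ∀ (f : Nat) (G : List (List Int)) (row col s : Int)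
    (dirs : List (Int × Int)), 5 * zeros G + dirs.length < f →
    dfsA f G row col s dirs = Tw G (dirs.map (fun d => (d.1 + row, d.2 + col))) s := by
  intro f
  induction f with
  | zero => intro G row col s dirs h; omega
  | succ f ih =>
    intro G row col s dirs h
    match dirs with
    | [] => simp [dfsA, Tw_nil]
    | (r, c) :: rest =>
      simp only [dfsA, List.map_cons]
      by_cases hg : r + row < 0 ∨ c + col < 0 ∨ (G.length : Int) - 1 ≤ r + row ∨
          ((G.headD []).length : Int) - 1 ≤ c + col
      · rw [if_pos hg, Tw_cons_guard hg]
        exact ih G row col s rest (by simp at h ⊢; omega)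
      · rw [if_neg hg]
        by_cases h0 : gridGet G (r + row) (c + col) = 0
        · rw [if_pos h0, Tw_cons_flip hg h0]
          have hz : zeros (gridSet G (r + row) (c + col)) < zeros G :=
            pv_zeros_gridSet_lt (by omega) (by omega) h0
          have hp : dfsA f (gridSet G (r + row) (c + col)) (r + row) (c + col) (s + 1) DIRECTION
              = Tw (gridSet G (r + row) (c + col))
                  (DIRECTION.map (fun d => (d.1 + (r + row), d.2 + (c + col)))) (s + 1) := by
            refine ih _ _ _ _ _ ?_
            rw [pv_DIRECTION_length]
            simp at h
            omega
          rw [pv_Tw_append]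
          simp only [hp]
          refine ih _ _ _ _ _ ?_
          have h1 := pv_zeros_Tw_le (gridSet G (r + row) (c + col))
            (DIRECTION.map (fun d => (d.1 + (r + row), d.2 + (c + col)))) (s + 1)
          simp at h
          omega
        · rw [if_neg h0, Tw_cons_skip hg h0]
          exact ih G row col s rest (by simp at h ⊢; omega)

-- the fueled stack loop of port B computes the ideal worklist flood fill
theorem pv_floodB_eq_Tw : ∀ (f : Nat) (G : List (List Int)) (st : List (Int × Int)) (s : Int),
    5 * zeros G + st.length < f → floodB f G st s = Tw G st s := by
  intro f
  induction f with
  | zero => intro G st s h; omega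
  | succ f ih =>
    intro G st s h
    match st with
    | [] => simp [floodB, Tw_nil]
    | (r, c) :: rest =>
      simp only [floodB]
      by_cases hg : r < 0 ∨ c < 0 ∨ (G.length : Int) - 1 ≤ r ∨
          ((G.headD []).length : Int) - 1 ≤ c
      · rw [if_pos hg, Tw_cons_guard hg]
        exact ih G rest s (by simp at h ⊢; omega)
      · rw [if_neg hg]
        rw [pv_cellB_eq G (by omega) (by omega)]
        by_cases h0 : gridGet G r c = 0
        · rw [if_pos h0, Tw_cons_flip hg h0]
          rw [pv_putB_eq, pv_nbrsB_eq]
          refine ih _ _ _ ?_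
          have hz : zeros (gridSet G r c) < zeros G :=
            pv_zeros_gridSet_lt (by omega) (by omega) h0
          simp only [List.length_append, List.length_map, pv_DIRECTION_length]
          simp at h
          omega
        · rw [if_neg h0, Tw_cons_skip hg h0]
          exact ih G rest s (by simp at h ⊢; omega)

-- the two per-seed flood fills agree, hence the inner column loops agree
theorem pv_cols_eq : ∀ (cols : List Int) (G : List (List Int)) (count : Int) (result : List Int)
    (row : Int), 0 ≤ row → (∀ col ∈ cols, 0 ≤ col) →
    goColB G count result row cols = cols.foldl (fun st2 col =>
      if gridGet st2.1 row col = 0 then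
        let R1 := gridSet st2.1 row col
        let p := dfsA (5 * zeros R1 + 5) R1 row col 1 DIRECTION
        (p.1, st2.2.1 + 1, st2.2.2 ++ [p.2])
      else st2) (G, count, result) := by
  intro cols
  induction cols with
  | nil => intro G count result row _ _; simp [goColB]
  | cons col cols ih =>
    intro G count result row hrow hcols
    have hcol : 0 ≤ col := hcols col (by simp)
    rw [List.foldl_cons]
    show goColB G count result row (col :: cols) = _
    rw [goColB]
    rw [pv_cellB_eq G hrow hcol]
    by_cases h0 : gridGet G row col = 0
    · rw [if_pos h0]
      simp only [if_pos h0]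
      rw [pv_putB_eq, pv_nbrsB_eq]
      have hseed : floodB (5 * (gridSet G row col).flatten.countP (fun x => x == 0) + 5)
            (gridSet G row col) (DIRECTION.map (fun d => (d.1 + row, d.2 + col))) 1
          = dfsA (5 * zeros (gridSet G row col) + 5) (gridSet G row col) row col 1 DIRECTION := by
        rw [pv_floodB_eq_Tw _ _ _ _ (by
          rw [pv_zeros_eq_flatten]
          simp only [List.length_map, pv_DIRECTION_length]
          omega)]
        rw [pv_dfsA_eq_Tw _ _ _ _ _ _ (by
          simp only [pv_DIRECTION_length]
          omega)]
      rw [hseed]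
      exact ih _ _ _ _ hrow (fun x hx => hcols x (by simp [hx]))
    · rw [if_neg h0]
      simp only [if_neg h0]
      exact ih _ _ _ _ hrow (fun x hx => hcols x (by simp [hx]))

theorem pv_rows_eq : ∀ (rows : List Int) (G : List (List Int)) (count : Int) (result : List Int),
    (∀ row ∈ rows, 0 ≤ row) →
    goRowB G count result rows = rows.foldl (fun st row =>
      (PySem.List.pyRange 0 (((st.1.headD []).length : Int) - 1) 1).foldl (fun st2 col =>
        if gridGet st2.1 row col = 0 then
          let R1 := gridSet st2.1 row col
          let p := dfsA (5 * zeros R1 + 5) R1 row col 1 DIRECTION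
          (p.1, st2.2.1 + 1, st2.2.2 ++ [p.2])
        else st2) st) (G, count, result) := by
  intro rows
  induction rows with
  | nil => intro G count result _; simp [goRowB]
  | cons row rows ih =>
    intro G count result hrows
    rw [List.foldl_cons, goRowB]
    rw [pv_cols_eq _ _ _ _ _ (hrows row (by simp))
      (fun x hx => ((PySem.List.mem_pyRange_one).1 hx).1)]
    exact ih _ _ _ (fun x hx => hrows x (by simp [hx]))

-- ===== VERDICT (by name: the statement is the Claim_ definition above) =====
theorem answer_spec : Claim_equal_answer := by
  intro R _ _
  show answer R = answer_alt R
  unfold answer answer_alt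
  rw [pv_rows_eq _ _ _ _ (fun x hx => ((PySem.List.mem_pyRange_one).1 hx).1)]
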